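-- pv_equiv track=rewrite | github.com/dmitry487/python-Ege2024 | ege/ege3/9/1/2/2.py | check
-- ===== SOURCE A (Python) =====
-- def check(row):
--     povtor = []
--     nepovtor = []
--     for num in row:
--         if row.count(num) == 3:
--             povtor.append(num)
--     for num in row:
--         if row.count(num) == 1:
--                 nepovtor.append(num)
--     if (
--         (
--             (len(set(row)) == 5) and (len(povtor) == 3)
--         )and
--         (
--            ((sum(nepovtor))//4) <= ((sum(povtor))//3)
--         )
--     ):return True
--     return False
-- ===== SOURCE B (Python) =====
-- def check(row):
--     s = sorted(row)
--     n = len(s)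
--     distinct = 0
--     triples = []
--     single_sum = 0
--     i = 0
--     while i < n:
--         j = i
--         while j < n and s[j] == s[i]:
--             j += 1
--         distinct += 1
--         run = j - i
--         if run == 3:
--             triples.append(s[i])
--         elif run == 1:
--             single_sum += s[i]
--         i = j
--     return distinct == 5 and len(triples) == 1 and single_sum // 4 <= triples[0]
-- ===== Notes on version B (the rewrite author's own statement) =====
-- stated objective: faster
-- what changed: B sorts the row once and classifies it in a single run-length scan over the sorted list (run of length 3 -> the unique triple value, run of length 1 -> added to the single sum), replacing A's two passes over row that each call row.count (a full scan) per element and its povtor/nepovtor lists.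
import Mathlib
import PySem

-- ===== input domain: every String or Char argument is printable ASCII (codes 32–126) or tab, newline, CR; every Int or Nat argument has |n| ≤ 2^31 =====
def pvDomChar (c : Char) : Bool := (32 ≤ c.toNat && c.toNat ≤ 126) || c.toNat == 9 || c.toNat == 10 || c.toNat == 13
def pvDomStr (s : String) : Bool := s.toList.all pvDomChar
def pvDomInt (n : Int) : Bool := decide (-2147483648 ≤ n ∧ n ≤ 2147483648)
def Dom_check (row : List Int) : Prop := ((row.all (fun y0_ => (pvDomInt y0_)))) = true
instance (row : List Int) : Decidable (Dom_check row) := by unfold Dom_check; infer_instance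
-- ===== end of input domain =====

-- B sorts the row once and does a single run-length scan over the sorted copy instead of
-- A's two passes that each call row.count per element (objective: faster).

-- ===== PORT A =====
def check (row : List Int) : Bool :=
  let povtor := row.foldl
    (fun acc num => if PySem.List.count row num == 3 then acc ++ [num] else acc) []
  let nepovtor := row.foldl
    (fun acc num => if PySem.List.count row num == 1 then acc ++ [num] else acc) []
  if (PySem.Set.len (PySem.Set.ofList row) == 5 && povtor.length == 3)
      && decide (PySem.Int.floordiv (nepovtor.foldl (fun acc x => acc + x) 0) 4
                  ≤ PySem.Int.floordiv (povtor.foldl (fun acc x => acc + x) 0) 3)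
  then true else false

-- ===== PORT B =====
-- the run-length scan of Source B's while loop: each step consumes one maximal run s[i:j]
-- of equal elements and updates (distinct, triples, single_sum)
def runScan : List Int → Int × List Int × Int
  | [] => (0, [], 0)
  | x :: xs =>
      let run : Int := 1 + ((xs.takeWhile (fun y => y == x)).length : Int)
      let r := runScan (xs.dropWhile (fun y => y == x))
      (r.1 + 1,
       (if run == 3 then [x] else []) ++ r.2.1,
       (if run == 1 then x else 0) + r.2.2)
  termination_by l => l.length
  decreasing_by
    simpa using Nat.lt_succ_of_le (List.length_dropWhile_le (fun y => y == x) xs)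

def check_alt (row : List Int) : Bool :=
  let s := PySem.List.sorted row (fun v => v) false
  let r := runScan s
  r.1 == 5 && r.2.1.length == 1
    && decide (PySem.Int.floordiv r.2.2 4 ≤ PySem.List.pyGetD r.2.1 0 0)

-- ===== PRECONDITION & SPEC =====
def Spec_check (row : List Int) (out : Bool) : Prop := out = check_alt row
instance (row : List Int) (out : Bool) : Decidable (Spec_check row out) := by unfold Spec_check; infer_instance

-- ===== CLAIM (what is proved, stated in full; the proofs are below) =====
def Claim_equal_check : Prop := ∀ (row : List Int), Dom_check row → Spec_check row (check row)

-- ===== LEMMAS AND PROOFS =====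

-- adding an element already present leaves a set unchanged
lemma set_add_of_mem (s : PySem.Set Int) (x : Int) (h : x ∈ s) : PySem.Set.add s x = s := by
  simp [PySem.Set.add, PySem.Set.contains, h]

-- folding Set.add over copies of a member changes nothing
lemma foldl_add_replicate (x : Int) (k : Nat) : ∀ s : PySem.Set Int, x ∈ s →
    List.foldl PySem.Set.add s (List.replicate k x) = s := by
  induction k with
  | zero => intro s h; simp
  | succ n ih =>
    intro s h
    simp only [List.replicate_succ, List.foldl_cons, set_add_of_mem s x h]
    exact ih s h

-- an element absent from the input stays at the front of the accumulator
lemma foldl_add_cons_notmem (x : Int) : ∀ (rest : List Int) (s : List Int), x ∉ rest →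
    List.foldl PySem.Set.add (x :: s) rest = x :: List.foldl PySem.Set.add s rest := by
  intro rest
  induction rest with
  | nil => intro s h; rfl
  | cons y t ih =>
    intro s h
    have hyx : y ≠ x := by rintro rfl; exact h (List.mem_cons_self)
    have hxt : x ∉ t := fun hx => h (List.mem_cons_of_mem _ hx)
    have hc : (x :: s).contains y = s.contains y := by
      simp only [List.contains_cons]
      cases hsy : s.contains y <;> simp <;> exact fun h2 => absurd h2 hyx
    simp only [List.foldl_cons, PySem.Set.add, PySem.Set.contains, hc]
    by_cases hy : s.contains y = true
    · simp only [hy, if_true]; exact ih s hxt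
    · simp only [hy, if_false, Bool.false_eq_true, List.cons_append]
      exact ih (s ++ [y]) hxt

-- set(x :: run of x ++ rest) = x :: set(rest) when x does not recur in rest
lemma ofList_head_decomp (x : Int) (xs rest : List Int) (k : Nat)
    (hxs : xs = List.replicate k x ++ rest) (hrest : x ∉ rest) :
    PySem.Set.ofList (x :: xs) = x :: PySem.Set.ofList rest := by
  have hadd : PySem.Set.add (PySem.Set.empty : PySem.Set Int) x = [x] := rfl
  show List.foldl PySem.Set.add PySem.Set.empty (x :: xs) = x :: List.foldl PySem.Set.add PySem.Set.empty rest
  rw [List.foldl_cons, hadd, hxs, List.foldl_append,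
    foldl_add_replicate x k [x] (List.mem_cons_self),
    foldl_add_cons_notmem x rest [] hrest]
  rfl

-- the head run of a sorted list: a block of copies of the head, none later
lemma sorted_head_run (x : Int) (xs : List Int) (h : (x :: xs).Pairwise (· ≤ ·)) :
    xs.takeWhile (fun y => y == x) = List.replicate (xs.takeWhile (fun y => y == x)).length x
    ∧ x ∉ xs.dropWhile (fun y => y == x) := by
  constructor
  · apply List.eq_replicate_of_mem
    intro y hy
    have := List.mem_takeWhile_imp hy
    simpa using this
  · intro hx
    have hsub : List.Sublist (xs.dropWhile (fun y => y == x)) xs := List.dropWhile_sublist _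
    cases hrest : xs.dropWhile (fun y => y == x) with
    | nil => rw [hrest] at hx; exact absurd hx (List.not_mem_nil)
    | cons y t =>
      rw [hrest] at hx hsub
      have hy : ¬ (y == x) = true := by
        have := List.head?_dropWhile_not (fun y => y == x) xs
        rw [hrest] at this; simpa using this
      have hyx : y ≠ x := by simpa using hy
      have hle : x ≤ y := (List.pairwise_cons.mp h).1 y (hsub.subset List.mem_cons_self)
      rcases List.mem_cons.mp hx with hxy | hx'
      · exact absurd hxy.symm hyx
      · have hp : (y :: t).Pairwise (· ≤ ·) := ((List.pairwise_cons.mp h).2).sublist hsub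
        have : y ≤ x := (List.pairwise_cons.mp hp).1 x hx'
        omega

-- the run scan of a sorted list computes (#distinct, values of count 3, sum of count-1 values)
lemma runScan_sorted : ∀ (n : Nat) (l : List Int), l.length ≤ n → l.Pairwise (· ≤ ·) →
    runScan l = (((PySem.Set.ofList l).length : Int),
      (PySem.Set.ofList l).filter (fun v => l.count v == 3),
      (((PySem.Set.ofList l).filter (fun v => l.count v == 1)).sum)) := by
  intro n
  induction n with
  | zero =>
    intro l hl _
    have : l = [] := List.eq_nil_of_length_eq_zero (Nat.le_zero.mp hl)
    subst this
    simp [runScan, PySem.Set.ofList, PySem.Set.empty]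
  | succ n ih =>
    intro l hl hs
    cases l with
    | nil => simp [runScan, PySem.Set.ofList, PySem.Set.empty]
    | cons x xs =>
      obtain ⟨htw, hnm⟩ := sorted_head_run x xs hs
      set k := (xs.takeWhile (fun y => y == x)).length with hk
      set rest := xs.dropWhile (fun y => y == x) with hrestdef
      have hxs : xs = List.replicate k x ++ rest := by
        rw [← htw]; exact (List.takeWhile_append_dropWhile).symm
      have hrp : rest.Pairwise (· ≤ ·) :=
        ((List.pairwise_cons.mp hs).2).sublist (List.dropWhile_sublist _)
      have hrl : rest.length ≤ n := by
        have h1 : rest.length ≤ xs.length := (List.dropWhile_sublist _).length_le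
        simp only [List.length_cons] at hl
        omega
      have IH := ih rest hrl hrp
      have hof : PySem.Set.ofList (x :: xs) = x :: PySem.Set.ofList rest :=
        ofList_head_decomp x xs rest k hxs hnm
      have hcx : (x :: xs).count x = k + 1 := by
        rw [hxs]
        simp [List.count_cons, List.count_replicate, List.count_eq_zero_of_not_mem hnm]
      have hcne : ∀ v : Int, v ≠ x → (x :: xs).count v = rest.count v := by
        intro v hv
        rw [hxs]
        simp [List.count_cons, List.count_replicate, hv, Ne.symm hv]
      rw [runScan]
      simp only [← hk, ← hrestdef, IH, hof]
      refine Prod.ext ?_ (Prod.ext ?_ ?_)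
      · simp only [List.length_cons]
        push_cast
        ring
      · simp only [List.filter_cons]
        have htail : (PySem.Set.ofList rest).filter (fun v => (x :: xs).count v == 3)
            = (PySem.Set.ofList rest).filter (fun v => rest.count v == 3) := by
          apply List.filter_congr
          intro v hv
          have hvx : v ≠ x := by
            rintro rfl
            exact hnm ((PySem.Set.mem_ofList rest v).mp hv)
          rw [hcne v hvx]
        rw [htail, hcx]
        by_cases h3 : k + 1 = 3
        · have e1 : ((1 : Int) + (k : Int) == 3) = true := by simp; omega
          have e2 : ((k + 1 : Nat) == 3) = true := by simp [h3]
          simp [e1, e2]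
        · have e1 : ((1 : Int) + (k : Int) == 3) = false := by simp; omega
          have e2 : ((k + 1 : Nat) == 3) = false := by simp; omega
          simp [e1, e2]
      · simp only [List.filter_cons]
        have htail : (PySem.Set.ofList rest).filter (fun v => (x :: xs).count v == 1)
            = (PySem.Set.ofList rest).filter (fun v => rest.count v == 1) := by
          apply List.filter_congr
          intro v hv
          have hvx : v ≠ x := by
            rintro rfl
            exact hnm ((PySem.Set.mem_ofList rest v).mp hv)
          rw [hcne v hvx]
        rw [htail, hcx]
        by_cases h1 : k + 1 = 1
        · have e1 : ((1 : Int) + (k : Int) == 1) = true := by simp; omega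
          have e2 : ((k + 1 : Nat) == 1) = true := by simp [h1]
          simp [e1, e2]
        · have e1 : ((1 : Int) + (k : Int) == 1) = false := by simp; omega
          have e2 : ((k + 1 : Nat) == 1) = false := by simp; omega
          simp [e1, e2]

-- folding (+) over an Int list is its sum
lemma foldl_add_id (l : List Int) (a : Int) : l.foldl (fun acc x => acc + x) a = a + l.sum := by
  induction l generalizing a with
  | nil => simp
  | cons x xs ih => simp [List.foldl_cons, ih]; ring

-- splitting a filter over a disjunction of disjoint tests: length
lemma length_filter_or (l : List Int) (a b : Int → Bool)
    (h : ∀ x, ¬(a x = true ∧ b x = true)) :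
    (l.filter (fun x => a x || b x)).length = (l.filter a).length + (l.filter b).length := by
  induction l with
  | nil => simp
  | cons x xs ih =>
    have hx := h x
    simp only [List.filter_cons]
    by_cases ha : a x = true
    · have hb : b x = false := by
        cases hbx : b x
        · rfl
        · exact absurd ⟨ha, hbx⟩ hx
      simp [ha, hb, ih]
      omega
    · simp only [Bool.not_eq_true] at ha
      cases hb : b x <;> simp [ha, hb, ih] <;> omega

-- splitting a filter over a disjunction of disjoint tests: sum
lemma sum_filter_or (l : List Int) (a b : Int → Bool)
    (h : ∀ x, ¬(a x = true ∧ b x = true)) :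
    (l.filter (fun x => a x || b x)).sum = (l.filter a).sum + (l.filter b).sum := by
  induction l with
  | nil => simp
  | cons x xs ih =>
    have hx := h x
    simp only [List.filter_cons]
    by_cases ha : a x = true
    · have hb : b x = false := by
        cases hbx : b x
        · rfl
        · exact absurd ⟨ha, hbx⟩ hx
      simp [ha, hb, ih]
      omega
    · simp only [Bool.not_eq_true] at ha
      cases hb : b x <;> simp [ha, hb, ih] <;> omega

-- the elements of row lying in `keys` and satisfying p, counted / summed key by key
lemma filter_mem_keys (row : List Int) (p : Int → Bool) :
    ∀ (keys : List Int), keys.Nodup →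
      (row.filter (fun v => decide (v ∈ keys) && p v)).length
          = ((keys.filter p).map (fun v => List.count v row)).sum
      ∧ (row.filter (fun v => decide (v ∈ keys) && p v)).sum
          = ((keys.filter p).map (fun v => (List.count v row : Int) * v)).sum := by
  intro keys hnd
  induction keys with
  | nil => simp
  | cons k ks ih =>
    have hk : k ∉ ks := (List.nodup_cons.mp hnd).1
    have hnd' : ks.Nodup := (List.nodup_cons.mp hnd).2
    obtain ⟨ih1, ih2⟩ := ih hnd'
    have hsplit : row.filter (fun v => decide (v ∈ k :: ks) && p v)
        = row.filter (fun v => ((v == k) && p v) || (decide (v ∈ ks) && p v)) := by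
      apply List.filter_congr
      intro x _
      by_cases hx : x = k <;> simp [hx]
    have hdisj : ∀ x, ¬((((x == k) && p x) = true) ∧ ((decide (x ∈ ks) && p x) = true)) := by
      intro x hx
      obtain ⟨h1, h2⟩ := hx
      simp only [Bool.and_eq_true, beq_iff_eq, decide_eq_true_eq] at h1 h2
      exact hk (h1.1 ▸ h2.1)
    have hfirst : row.filter (fun v => (v == k) && p v)
        = if p k then List.replicate (List.count k row) k else [] := by
      by_cases hpk : p k = true
      · rw [if_pos hpk, ← List.filter_beq (l := row) k]
        apply List.filter_congr
        intro x _
        by_cases hx : x = k <;> simp [hx, hpk]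
      · rw [if_neg hpk, List.filter_eq_nil_iff.mpr]
        intro x _
        by_cases hx : x = k <;> simp [hx, hpk]
    constructor
    · rw [hsplit, length_filter_or _ _ _ hdisj, hfirst, ih1]
      by_cases hpk : p k = true <;> simp [hpk]
    · rw [hsplit, sum_filter_or _ _ _ hdisj, hfirst, ih2]
      by_cases hpk : p k = true <;> simp [hpk, mul_comm]

-- counted / summed over the distinct values of row
lemma filter_via_set (row : List Int) (p : Int → Bool) :
    (row.filter p).length
        = (((PySem.Set.ofList row).filter p).map (fun v => List.count v row)).sum
    ∧ (row.filter p).sum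
        = (((PySem.Set.ofList row).filter p).map (fun v => (List.count v row : Int) * v)).sum := by
  have h := filter_mem_keys row p (PySem.Set.ofList row) (PySem.Set.nodup_ofList row)
  have hcongr : row.filter p = row.filter (fun v => decide (v ∈ PySem.Set.ofList row) && p v) := by
    apply List.filter_congr
    intro x hx
    simp [PySem.Set.mem_ofList, hx]
  rw [hcongr]
  exact h

theorem check_spec_aux (row : List Int) : check row = check_alt row := by
  -- reduce B to filters over the distinct values of the sorted copy
  have hsp : (PySem.List.sorted row (fun v => v) false).Pairwise (· ≤ ·) := by
    simpa using PySem.List.sorted_pairwise row (fun v => v)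
  have hrs := runScan_sorted (PySem.List.sorted row (fun v => v) false).length
    (PySem.List.sorted row (fun v => v) false) le_rfl hsp
  have hperm : (PySem.List.sorted row (fun v => v) false).Perm row :=
    PySem.List.sorted_perm row (fun v => v) false
  unfold check check_alt
  simp only [hrs]
  -- reduce A to filters over row
  simp only [PySem.List.foldl_append_if_eq_filter, List.nil_append]
  have hite : ∀ (b : Bool), (if b = true then true else false) = b := by
    intro b; cases b <;> simp
  rw [hite]
  simp only [PySem.List.count_eq, foldl_add_id, zero_add]
  set s := PySem.List.sorted row (fun v => v) false with hsdef
  set S := PySem.Set.ofList row with hS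
  set Q := PySem.Set.ofList s with hQ
  -- counts in the sorted copy are counts in row
  have hcnt : ∀ v : Int, List.count v s = List.count v row := fun v => hperm.count_eq v
  have hQ3 : Q.filter (fun v => List.count v s == 3) = Q.filter (fun v => List.count v row == 3) := by
    apply List.filter_congr; intro v _; rw [hcnt v]
  have hQ1 : Q.filter (fun v => List.count v s == 1) = Q.filter (fun v => List.count v row == 1) := by
    apply List.filter_congr; intro v _; rw [hcnt v]
  rw [hQ3, hQ1]
  -- the distinct values of s are a permutation of those of row
  have hQS : Q.Perm S := by
    rw [List.perm_ext_iff_of_nodup (PySem.Set.nodup_ofList s) (PySem.Set.nodup_ofList row)]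
    intro v
    simp only [PySem.Set.mem_ofList]
    exact hperm.mem_iff
  set T3 := S.filter (fun v => List.count v row == 3) with hT3
  set T1 := S.filter (fun v => List.count v row == 1) with hT1
  have hp3 : (Q.filter (fun v => List.count v row == 3)).Perm T3 := hQS.filter _
  have hp1 : (Q.filter (fun v => List.count v row == 1)).Perm T1 := hQS.filter _
  have hmem3 : ∀ v ∈ T3, List.count v row = 3 := by
    intro v hv; simpa using (List.of_mem_filter hv)
  -- row-level filters versus distinct-value filters
  obtain ⟨hlen3, hsum3⟩ := filter_via_set row (fun v => List.count v row == 3)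
  obtain ⟨hlen1, hsum1⟩ := filter_via_set row (fun v => List.count v row == 1)
  rw [← hS, ← hT3] at hlen3 hsum3
  rw [← hS, ← hT1] at hlen1 hsum1
  have hmem1 : ∀ v ∈ T1, List.count v row = 1 := by
    intro v hv; simpa using (List.of_mem_filter hv)
  have hlen3' : (row.filter (fun v => List.count v row == 3)).length = 3 * T3.length := by
    rw [hlen3, List.map_congr_left (g := fun _ => 3) hmem3, List.map_const', List.sum_replicate,
      smul_eq_mul]
    omega
  have hsum1' : (row.filter (fun v => List.count v row == 1)).sum = T1.sum := by
    rw [hsum1, List.map_congr_left (g := fun v => v) (by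
      intro a ha
      rw [hmem1 a ha]
      simp), List.map_id']
  rw [Bool.eq_iff_iff]
  simp only [Bool.and_eq_true, beq_iff_eq, decide_eq_true_eq]
  rw [hlen3', hsum1', hp1.sum_eq]
  have hQlen : Q.length = S.length := hQS.length_eq
  have hQ3len : (Q.filter (fun v => List.count v row == 3)).length = T3.length := hp3.length_eq
  by_cases h3 : T3.length = 1
  · obtain ⟨t, ht⟩ := List.length_eq_one_iff.mp h3
    have htc : List.count t row = 3 := hmem3 t (by rw [ht]; simp)
    have hQ3eq : Q.filter (fun v => List.count v row == 3) = [t] := by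
      rw [← List.perm_singleton]
      rw [ht] at hp3
      exact hp3
    have hsum3' : (row.filter (fun v => List.count v row == 3)).sum = 3 * t := by
      rw [hsum3, ht]
      simp [htc]
    have hfd : PySem.Int.floordiv (3 * t) 3 = t := by
      rw [PySem.Int.floordiv_eq_iff_of_pos (by norm_num)]
      omega
    rw [hsum3', hfd, hQ3eq]
    simp only [List.length_cons, List.length_nil, PySem.List.pyGetD_zero_cons, PySem.Set.len, hQlen]
    constructor
    · rintro ⟨⟨h5, -⟩, hle⟩
      exact ⟨⟨by exact_mod_cast h5, trivial⟩, hle⟩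
    · rintro ⟨⟨h5, -⟩, hle⟩
      exact ⟨⟨by exact_mod_cast h5, by omega⟩, hle⟩
  · constructor
    · rintro ⟨⟨-, h2⟩, -⟩
      exact absurd (by omega : T3.length = 1) h3
    · rintro ⟨⟨-, h2⟩, -⟩
      rw [hQ3len] at h2
      exact absurd h2 h3

-- ===== VERDICT (by name: the statement is the Claim_ definition above) =====
theorem check_spec : Claim_equal_check := by
  intro row _
  exact check_spec_aux row
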